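-- pv_equiv track=rewrite | github.com/Buuks1/empDatabase | recreatePP.py | solution
-- ===== SOURCE A (Python) =====
-- def solution(S):
--     photos = {}
--     cleaned = S.replace(".", ",")
--     lines = cleaned.strip().split('\n')
--     for photoid, photo in enumerate(lines):
--         trimmed = photo.split(',')
--         name = trimmed[0]
--         type = trimmed[1]
--         city = trimmed[2].strip()
--         date_time = trimmed[3].strip()
--         photos[photoid] = {
--             'id': photoid,
--             'name': name,
--             'type': type,
--             'city': city,
--             'date': date_time
--         }
--
--     cities = {}
--     for photo in photos.values():
--         city_group = photo['city']
--         if city_group not in cities: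
--             cities[city_group] = []
--         cities[city_group].append(photo)
--
--     for city_group in cities:
--         cities[city_group].sort(key = lambda p: p['date'])
--
--     for city_group in cities:
--         group = cities[city_group]
--         photo_count = len(group)
--         for i in range (photo_count):
--             photo = group[i]
--             number = i + 1
--             count_str = str(number)
--             if len(count_str) < 2:
--                 count_str = '0' + count_str
--             new_name = city_group + count_str + '.' + photo['type']
--             photo['new_name'] = new_name
--
--     new_string = ""
--     for photo in photos.values():
--         new_string = new_string + photo['new_name'] + "\n"
--     return new_string
-- ===== SOURCE B (Python) =====
-- def solution(S):
--     lines = S.replace(".", ",").strip().split('\n')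
--     recs = []
--     for idx, line in enumerate(lines):
--         parts = line.split(',')
--         recs.append((idx, parts[0], parts[1], parts[2].strip(), parts[3].strip()))
--     results = [None] * len(recs)
--     counts = {}
--     for idx, _name, typ, city, date in sorted(recs, key=lambda r: (r[3], r[4])):
--         n = counts.get(city, 0) + 1
--         counts[city] = n
--         num = str(n)
--         if len(num) < 2:
--             num = '0' + num
--         results[idx] = city + num + '.' + typ
--     out = ""
--     for r in results:
--         out = out + r + "\n"
--     return out
-- ===== Notes on version B (the rewrite author's own statement) =====
-- stated objective: alternative
-- what changed: Instead of building a dict of per-city lists, sorting each group by date and writing names back through shared photo dicts, B does one stable sort of flat (index,name,type,city,date) tuples by the key (city,date), sweeps it once with a per-city counter dict, writes each renamed photo into a result slot at its original index, and concatenates the slots.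
import Mathlib
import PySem

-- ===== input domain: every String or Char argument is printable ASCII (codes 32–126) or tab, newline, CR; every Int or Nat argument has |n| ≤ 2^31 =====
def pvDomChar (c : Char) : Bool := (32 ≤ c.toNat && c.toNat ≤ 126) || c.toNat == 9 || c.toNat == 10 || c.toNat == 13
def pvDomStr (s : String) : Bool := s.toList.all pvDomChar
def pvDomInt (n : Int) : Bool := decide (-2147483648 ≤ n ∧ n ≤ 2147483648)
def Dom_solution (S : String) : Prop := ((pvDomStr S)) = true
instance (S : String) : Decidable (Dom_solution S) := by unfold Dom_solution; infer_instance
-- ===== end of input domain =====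

-- B replaces A's group-by-city dict with sorted per-group lists by ONE stable sort of flat
-- records on the key (city, date) plus a single counter-dict sweep writing results by original
-- index (objective: alternative). A mutates only its own local dicts, so only return values matter.

-- a parsed photo record: original line index, name, type, city, date
structure pvRec where
  id : Nat
  name : String
  ty : String
  city : String
  date : String
deriving DecidableEq, Repr

-- ===== PORT A =====

-- count_str = str(number); if len(count_str) < 2: count_str = '0' + count_str
def pvPadA (n : Nat) : String :=
  let s := PySem.Int.toStr (n : Int)
  if PySem.Str.len s < 2 then "0" ++ s else s

-- one iteration of A's parsing loop: trimmed = photo.split(','); name/type/city/date from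
-- indices 0..3 (none = IndexError on a short line, excluded by Pre_solution)
def pvParseA (photo : String) : Option (String × String × String × String) :=
  let trimmed := (PySem.Str.split? photo ",").getD []   -- sep "," ≠ "" so split? is never none
  match PySem.List.pyGet? trimmed 0, PySem.List.pyGet? trimmed 1,
        PySem.List.pyGet? trimmed 2, PySem.List.pyGet? trimmed 3 with
  | some name, some ty, some city, some date =>
      some (name, ty, PySem.Str.strip city, PySem.Str.strip date)
  | _, _, _, _ => none

-- photos[photoid] = {...}: the record built from an enumerate pair (photoid ≥ 0, so .toNat is exact)
def pvMkA (q : Int × (String × String × String × String)) : pvRec :=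
  ⟨q.1.toNat, q.2.1, q.2.2.1, q.2.2.2.1, q.2.2.2.2⟩

-- A's body after the parsing loop succeeded on every line
def pvBodyA (rows : List (String × String × String × String)) : String :=
  -- photos = {photoid: {...}}
  let photos : PySem.Dict Int pvRec :=
    (PySem.List.enumerate rows).foldl (fun d q => d.insert q.1 (pvMkA q)) PySem.Dict.empty
  -- if city not in cities: cities[city] = []; cities[city].append(photo)  (= modify with default [])
  let cities : PySem.Dict String (List pvRec) :=
    photos.values.foldl (fun d p => d.modify p.city [] (fun g => g ++ [p])) PySem.Dict.empty
  -- for city_group in cities: cities[city_group].sort(key=date)  (in-place value update)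
  let cities2 :=
    cities.keys.foldl
      (fun d c => d.modify c [] (fun g => PySem.List.sorted g (fun p => p.date))) cities
  -- photo['new_name'] = ... : Python mutates the shared photo dicts; the port records the same
  -- assignments keyed by the photo's identity (its unique line index).
  -- 'for i in range(photo_count): photo = group[i]; number = i + 1' is ported as enumerate of the
  -- group: the same indices i and elements group[i] in the same order.
  let newNames : PySem.Dict Nat String :=
    cities2.keys.foldl
      (fun nn c =>
        (PySem.List.enumerate (cities2.getD c [])).foldl
          (fun nn q => nn.insert q.2.id (c ++ pvPadA (q.1.toNat + 1) ++ "." ++ q.2.ty)) nn)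
      PySem.Dict.empty
  -- new_string += photo['new_name'] + '\n'  (the lookup never misses; getD's "" is unreachable)
  photos.values.foldl (fun acc p => acc ++ newNames.getD p.id "" ++ "\n") ""

def solution (S : String) : String :=
  -- lines = S.replace('.', ',').strip().split('\n')
  let lines := (PySem.Str.split? (PySem.Str.strip (PySem.Str.replace S "." ",")) "\n").getD []
  match lines.mapM pvParseA with
  | none => ""        -- some line has < 4 fields: Python raises IndexError (outside Pre_solution)
  | some rows => pvBodyA rows

-- ===== PORT B =====

-- num = str(n); if len(num) < 2: num = '0' + num
def pvPadB (n : Nat) : String :=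
  let s := PySem.Int.toStr (n : Int)
  if PySem.Str.len s < 2 then "0" ++ s else s

-- parts = line.split(','); (parts[0], parts[1], parts[2].strip(), parts[3].strip())
def pvParseB (line : String) : Option (String × String × String × String) :=
  let parts := (PySem.Str.split? line ",").getD []   -- sep "," ≠ "" so split? is never none
  match PySem.List.pyGet? parts 0, PySem.List.pyGet? parts 1,
        PySem.List.pyGet? parts 2, PySem.List.pyGet? parts 3 with
  | some name, some ty, some city, some date =>
      some (name, ty, PySem.Str.strip city, PySem.Str.strip date)
  | _, _, _, _ => none

-- the body of B's sweep loop: n = counts.get(city, 0) + 1; counts[city] = n;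
-- results[idx] = city + pad(n) + '.' + typ   (idx ≥ 0 from enumerate, so .set at idx is exact)
def pvStepB (st : List String × PySem.Dict String Nat) (r : pvRec) :
    List String × PySem.Dict String Nat :=
  let n := st.2.getD r.city 0 + 1
  (st.1.set r.id (r.city ++ pvPadB n ++ "." ++ r.ty), st.2.insert r.city n)

-- B's body after the parsing loop succeeded on every line
def pvBodyB (rows : List (String × String × String × String)) : String :=
  let recs : List pvRec :=
    (PySem.List.enumerate rows).map (fun q => ⟨q.1.toNat, q.2.1, q.2.2.1, q.2.2.2.1, q.2.2.2.2⟩)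
  -- sorted(recs, key=lambda r: (r[3], r[4]))  — one stable sort by (city, date)
  let srt := PySem.List.sorted2 recs (fun r => r.city) (fun r => r.date)
  -- results = [None] * len(recs); counts = {}; sweep
  let final := srt.foldl pvStepB (List.replicate recs.length "", PySem.Dict.empty)
  -- out += r + '\n'
  final.1.foldl (fun acc s => acc ++ s ++ "\n") ""

def solution_alt (S : String) : String :=
  -- lines = S.replace('.', ',').strip().split('\n')
  let lines := (PySem.Str.split? (PySem.Str.strip (PySem.Str.replace S "." ",")) "\n").getD []
  match lines.mapM pvParseB with
  | none => ""        -- some line has < 4 fields: Python raises IndexError (outside Pre_solution)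
  | some rows => pvBodyB rows

-- ===== PRECONDITION & SPEC =====

-- Pre_solution excludes exactly the inputs where some line of the cleaned, stripped input has
-- fewer than 4 comma-separated fields: there Python A raises IndexError (trimmed[1]/[2]/[3]).
def Pre_solution (S : String) : Prop :=
  ∀ line ∈ (PySem.Str.split? (PySem.Str.strip (PySem.Str.replace S "." ",")) "\n").getD [],
    4 ≤ ((PySem.Str.split? line ",").getD []).length

instance (S : String) : Decidable (Pre_solution S) := by unfold Pre_solution; infer_instance

def pvWitness_solution : String := "a.jpg. york. 2013-09-05\nb.png. york. 2013-09-01"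

def Spec_solution (S : String) (out : String) : Prop := out = solution_alt S
instance (S : String) (out : String) : Decidable (Spec_solution S out) := by
  unfold Spec_solution; infer_instance

-- ===== CLAIM (what is proved, stated in full; the proofs are below) =====
def Claim_equal_solution : Prop :=
  ∀ (S : String), Dom_solution S → Pre_solution S → Spec_solution S (solution S)

-- ===== LEMMAS AND PROOFS =====

-- the common name every photo ends with: city + zero-padded rank in its city group sorted by date
def pvGrp (recs : List pvRec) (c : String) : List pvRec :=
  PySem.List.sorted (recs.filter (fun p => p.city == c)) (fun p => p.date)

def pvSpecName (recs : List pvRec) (r : pvRec) : String :=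
  r.city ++ pvPadA (List.idxOf r (pvGrp recs r.city) + 1) ++ "." ++ r.ty

-- ---- enumerate facts ----

theorem pvEnum_map_snd {α : Type} (xs : List α) (s : Int) :
    (PySem.List.enumerate xs s).map Prod.snd = xs := by
  induction xs generalizing s with
  | nil => rfl
  | cons x t ih => simp [PySem.List.enumerate, ih]

theorem pvEnum_length {α : Type} (xs : List α) (s : Int) :
    (PySem.List.enumerate xs s).length = xs.length := by
  have h := congrArg List.length (pvEnum_map_snd xs s)
  simp only [List.length_map] at h
  exact h

theorem pvEnum_getElem? {α : Type} (xs : List α) (s : Int) (i : Nat) :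
    (PySem.List.enumerate xs s)[i]? = xs[i]?.map (fun x => (s + (i : Int), x)) := by
  induction xs generalizing s i with
  | nil => simp [PySem.List.enumerate]
  | cons x t ih =>
      cases i with
      | zero => simp [PySem.List.enumerate]
      | succ j =>
          have h := ih (s + 1) j
          simp only [PySem.List.enumerate, List.getElem?_cons_succ, h]
          have : s + 1 + (j : Int) = s + ((j : Nat) + 1 : Nat) := by push_cast; ring
          rw [this]

theorem pvEnum_mem {α : Type} (xs : List α) (i : Nat) (r : α) (h : xs[i]? = some r)
    (s : Int) : (s + (i : Int), r) ∈ PySem.List.enumerate xs s := by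
  have h2 : (PySem.List.enumerate xs s)[i]? = some (s + (i : Int), r) := by
    rw [pvEnum_getElem?, h]; rfl
  exact List.mem_of_getElem? h2

theorem pvEnum_map_fst_toNat {α : Type} (xs : List α) :
    (PySem.List.enumerate xs 0).map (fun q => q.1.toNat) = List.range xs.length := by
  apply List.ext_getElem?
  intro i
  by_cases hi : i < xs.length
  · rw [List.getElem?_map, pvEnum_getElem?, List.getElem?_eq_getElem hi, List.getElem?_range hi]
    simp
  · have h1 : xs[i]? = none := List.getElem?_eq_none_iff.mpr (by omega)
    have h2 : (List.range xs.length)[i]? = none := List.getElem?_eq_none_iff.mpr (by simp; omega)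
    rw [List.getElem?_map, pvEnum_getElem?, h1, h2]
    rfl

theorem pvEnum_fst_ge {α : Type} (xs : List α) (s : Int) :
    ∀ p ∈ PySem.List.enumerate xs s, s ≤ p.1 := by
  induction xs generalizing s with
  | nil => simp [PySem.List.enumerate]
  | cons x t ih =>
      intro p hp
      simp only [PySem.List.enumerate, List.mem_cons] at hp
      rcases hp with rfl | hp
      · exact le_refl _
      · exact le_trans (by omega) (ih (s + 1) p hp)

theorem pvEnum_fst_nodup {α : Type} (xs : List α) (s : Int) :
    ((PySem.List.enumerate xs s).map Prod.fst).Nodup := by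
  induction xs generalizing s with
  | nil => simp [PySem.List.enumerate]
  | cons x t ih =>
      simp only [PySem.List.enumerate, List.map_cons, List.nodup_cons]
      refine ⟨?_, ih (s + 1)⟩
      intro hmem
      rcases List.mem_map.mp hmem with ⟨p, hp, hfst⟩
      have := pvEnum_fst_ge t (s + 1) p hp
      omega

-- ---- generic fold shapes ----

theorem pvFoldl_flatMap {γ β δ : Type} (ks : List γ) (g : γ → List β) (f : δ → β → δ) (i : δ) :
    (ks.flatMap g).foldl f i = ks.foldl (fun a c => (g c).foldl f a) i := by
  induction ks generalizing i with
  | nil => rfl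
  | cons k t ih => simp [List.flatMap_cons, List.foldl_append, ih]

-- ---- the lexicographic comparison used by sorted2, and its order facts ----

def pvLexB (a b : pvRec) : Bool :=
  decide (a.city < b.city) || (!decide (b.city < a.city) && decide (a.date < b.date))

def pvDateB (a b : pvRec) : Bool := decide (a.date < b.date)

theorem pvLex_true_iff (a b : pvRec) :
    pvLexB a b = true ↔ (a.city < b.city ∨ (¬ b.city < a.city ∧ a.date < b.date)) := by
  simp [pvLexB]

theorem pvLex_false_iff (a b : pvRec) :
    pvLexB a b = false ↔ (¬ a.city < b.city ∧ (¬ b.city < a.city → ¬ a.date < b.date)) := by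
  rw [Bool.eq_false_iff]
  have : (pvLexB a b ≠ true) = ¬ (pvLexB a b = true) := rfl
  rw [this, pvLex_true_iff]
  constructor
  · intro h
    exact ⟨fun hc => h (Or.inl hc), fun hb hd => h (Or.inr ⟨hb, hd⟩)⟩
  · rintro ⟨h1, h2⟩ (hc | ⟨hb, hd⟩)
    · exact h1 hc
    · exact h2 hb hd

theorem pvLex_asymm {a b : pvRec} (h : pvLexB a b = true) : pvLexB b a = false := by
  rw [pvLex_true_iff] at h
  rw [pvLex_false_iff]
  rcases h with h | ⟨h1, h2⟩
  · exact ⟨lt_asymm h, fun h' => absurd h h'⟩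
  · exact ⟨h1, fun _ => lt_asymm h2⟩

theorem pvLex_trans_neg {x y z : pvRec} (hzy : pvLexB z y = false) (hxy : pvLexB x y = true) :
    pvLexB z x = false := by
  rw [pvLex_false_iff] at hzy
  rw [pvLex_true_iff] at hxy
  rw [pvLex_false_iff]
  obtain ⟨A1, A2⟩ := hzy
  rcases hxy with hB | ⟨B1, B2⟩
  · have hxz : x.city < z.city := lt_of_lt_of_le hB (not_lt.mp A1)
    exact ⟨fun h => absurd hxz (lt_asymm h), fun h => absurd hxz h⟩
  · have hxy' : x.city ≤ y.city := not_lt.mp B1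
    have hyz : y.city ≤ z.city := not_lt.mp A1
    refine ⟨not_lt.mpr (le_trans hxy' hyz), ?_⟩
    intro hC
    have hzx : z.city ≤ x.city := not_lt.mp hC
    have hyz' : ¬ y.city < z.city := not_lt.mpr (le_trans hzx hxy')
    have hdz : y.date ≤ z.date := not_lt.mp (A2 hyz')
    exact lt_asymm (lt_of_lt_of_le B2 hdz)

theorem pvInv_insertBy {l : List pvRec} (x : pvRec)
    (h : l.Pairwise (fun a b => pvLexB b a = false)) :
    (PySem.List.insertBy pvLexB x l).Pairwise (fun a b => pvLexB b a = false) := by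
  induction l with
  | nil => simp [PySem.List.insertBy]
  | cons y ys ih =>
      rcases List.pairwise_cons.mp h with ⟨hy, hys⟩
      by_cases hb : pvLexB x y = true
      · simp [PySem.List.insertBy, hb]
        refine ⟨⟨pvLex_asymm hb, ?_⟩, hy, hys⟩
        intro z hz
        exact pvLex_trans_neg (hy z hz) hb
      · have hb' : pvLexB x y = false := by
          cases hxy : pvLexB x y with
          | false => rfl
          | true => exact absurd hxy hb
        simp [PySem.List.insertBy, hb]
        refine ⟨?_, ih hys⟩
        intro z hz
        rcases (PySem.List.mem_insertBy _ _ _ _).mp hz with rfl | hz'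
        · exact hb'
        · exact hy z hz'

-- ---- filter commutes with the lexicographic insertion sort ----

theorem pvIns_front (x : pvRec) (l : List pvRec)
    (h : ∀ z ∈ l, pvDateB x z = true) :
    PySem.List.insertBy pvDateB x l = x :: l := by
  cases l with
  | nil => rfl
  | cons z rest => simp [PySem.List.insertBy, h z List.mem_cons_self]

theorem pvFilter_insertBy (c : String) (x : pvRec) (l : List pvRec)
    (hl : l.Pairwise (fun a b => pvLexB b a = false)) :
    (PySem.List.insertBy pvLexB x l).filter (fun p => p.city == c)
      = if x.city == c then
          PySem.List.insertBy pvDateB x (l.filter (fun p => p.city == c))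
        else l.filter (fun p => p.city == c) := by
  induction l with
  | nil =>
      by_cases hx : (x.city == c) = true <;> simp [PySem.List.insertBy, hx]
  | cons y ys ih =>
      rcases List.pairwise_cons.mp hl with ⟨hy, hys⟩
      by_cases hb : pvLexB x y = true
      · -- x is inserted in front of y
        rw [show PySem.List.insertBy pvLexB x (y :: ys) = x :: y :: ys by
              simp [PySem.List.insertBy, hb]]
        by_cases hx : (x.city == c) = true
        · have hxc : x.city = c := by simpa using hx
          have hfront : ∀ z ∈ (y :: ys).filter (fun p => p.city == c), pvDateB x z = true := by
            intro z hz
            rcases List.mem_filter.mp hz with ⟨hzmem, hzc⟩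
            have hzc' : z.city = c := by simpa using hzc
            rw [pvLex_true_iff] at hb
            rcases List.mem_cons.mp hzmem with rfl | hz'
            · rcases hb with hcity | ⟨h1, h2⟩
              · rw [hxc, hzc'] at hcity
                exact absurd hcity (lt_irrefl c)
              · simpa [pvDateB] using h2
            · have hzy := hy z hz'
              rw [pvLex_false_iff] at hzy
              obtain ⟨A1, A2⟩ := hzy
              rcases hb with hcity | ⟨h1, h2⟩
              · have hcz : c < z.city := lt_of_lt_of_le (hxc ▸ hcity) (not_lt.mp A1)
                rw [hzc'] at hcz
                exact absurd hcz (lt_irrefl c)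
              · have hxy' : x.city ≤ y.city := not_lt.mp h1
                have hyc : ¬ y.city < z.city := by
                  rw [hzc', ← hxc]
                  exact not_lt.mpr hxy'
                have hdz : y.date ≤ z.date := not_lt.mp (A2 hyc)
                have : x.date < z.date := lt_of_lt_of_le h2 hdz
                simpa [pvDateB] using this
          rw [if_pos hx, List.filter_cons, if_pos hx, pvIns_front x _ hfront]
        · have hx' : (x.city == c) = false := by
            cases hxx : (x.city == c) with
            | false => rfl
            | true => exact absurd hxx hx
          rw [if_neg hx, List.filter_cons, if_neg hx]
      · -- x goes deeper: y :: insertBy x ys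
        have hb' : pvLexB x y = false := by
          cases hxy : pvLexB x y with
          | false => rfl
          | true => exact absurd hxy hb
        rw [show PySem.List.insertBy pvLexB x (y :: ys) = y :: PySem.List.insertBy pvLexB x ys by
              simp [PySem.List.insertBy, hb']]
        rw [List.filter_cons, ih hys, List.filter_cons]
        by_cases hx : (x.city == c) = true
        · simp only [if_pos hx]
          by_cases hyq : (y.city == c) = true
          · have hxc : x.city = c := by simpa using hx
            have hyc : y.city = c := by simpa using hyq
            have hdxy : pvDateB x y = false := by
              rw [pvLex_false_iff] at hb'
              obtain ⟨h1, h2⟩ := hb'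
              have hnlt : ¬ y.city < x.city := by rw [hxc, hyc]; exact lt_irrefl c
              simpa [pvDateB] using h2 hnlt
            simp only [if_pos hyq]
            simp [PySem.List.insertBy, hdxy]
          · simp only [if_neg hyq]
        · simp only [if_neg hx]

theorem pvFoldl_filter (c : String) :
    ∀ (xs acc : List pvRec), acc.Pairwise (fun a b => pvLexB b a = false) →
    ((xs.foldl (fun acc x => PySem.List.insertBy pvLexB x acc) acc).filter
        (fun p => p.city == c))
      = (xs.filter (fun p => p.city == c)).foldl
          (fun acc x => PySem.List.insertBy pvDateB x acc)
          (acc.filter (fun p => p.city == c)) := by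
  intro xs
  induction xs with
  | nil => intro acc _; rfl
  | cons x t ih =>
      intro acc hacc
      rw [List.foldl_cons, ih _ (pvInv_insertBy x hacc), pvFilter_insertBy c x acc hacc,
          List.filter_cons]
      by_cases hx : (x.city == c) = true
      · rw [if_pos hx, if_pos hx, List.foldl_cons]
      · rw [if_neg hx, if_neg hx]

theorem pvFilter_sorted2 (xs : List pvRec) (c : String) :
    (PySem.List.sorted2 xs (fun r => r.city) (fun r => r.date)).filter (fun p => p.city == c)
      = PySem.List.sorted (xs.filter (fun p => p.city == c)) (fun p => p.date) := by
  have h1 : PySem.List.sorted2 xs (fun r => r.city) (fun r => r.date)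
      = xs.foldl (fun acc x => PySem.List.insertBy pvLexB x acc) [] := rfl
  have h2 : PySem.List.sorted (xs.filter (fun p => p.city == c)) (fun p => p.date)
      = (xs.filter (fun p => p.city == c)).foldl
          (fun acc x => PySem.List.insertBy pvDateB x acc) [] := rfl
  rw [h1, h2]
  simpa using pvFoldl_filter c xs [] List.Pairwise.nil

-- ---- B's sweep: each slot gets the city + rank name ----

theorem pvSweep_length (ss : List pvRec) :
    ∀ (res : List String) (counts : PySem.Dict String Nat),
    (ss.foldl pvStepB (res, counts)).1.length = res.length := by
  induction ss with
  | nil => intro res counts; rfl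
  | cons x t ih =>
      intro res counts
      rw [List.foldl_cons]
      show (t.foldl pvStepB (pvStepB (res, counts) x)).1.length = res.length
      rw [show pvStepB (res, counts) x
            = (res.set x.id (x.city ++ pvPadB (counts.getD x.city 0 + 1) ++ "." ++ x.ty),
               counts.insert x.city (counts.getD x.city 0 + 1)) from rfl]
      rw [ih]
      exact List.length_set

theorem pvSweep_untouched (ss : List pvRec) :
    ∀ (res : List String) (counts : PySem.Dict String Nat) (j : Nat),
    (∀ r ∈ ss, r.id ≠ j) → (ss.foldl pvStepB (res, counts)).1[j]? = res[j]? := by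
  induction ss with
  | nil => intro res counts j _; rfl
  | cons x t ih =>
      intro res counts j hj
      rw [List.foldl_cons]
      rw [show pvStepB (res, counts) x
            = (res.set x.id (x.city ++ pvPadB (counts.getD x.city 0 + 1) ++ "." ++ x.ty),
               counts.insert x.city (counts.getD x.city 0 + 1)) from rfl]
      rw [ih _ _ j (fun r hr => hj r (List.mem_cons_of_mem x hr))]
      exact List.getElem?_set_ne (hj x List.mem_cons_self)

theorem pvSweep_get (ss : List pvRec) :
    ∀ (res : List String) (counts : PySem.Dict String Nat) (r : pvRec),
    (ss.map (·.id)).Nodup → r ∈ ss → r.id < res.length →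
    (ss.foldl pvStepB (res, counts)).1[r.id]?
      = some (r.city
          ++ pvPadB (counts.getD r.city 0
                      + (List.idxOf r (ss.filter (fun p => p.city == r.city)) + 1))
          ++ "." ++ r.ty) := by
  induction ss with
  | nil => intro _ _ r _ hr _; simp at hr
  | cons x t ih =>
      intro res counts r hnd hr hlt
      rw [List.map_cons, List.nodup_cons] at hnd
      obtain ⟨hxid, hnd'⟩ := hnd
      rw [List.foldl_cons]
      rw [show pvStepB (res, counts) x
            = (res.set x.id (x.city ++ pvPadB (counts.getD x.city 0 + 1) ++ "." ++ x.ty),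
               counts.insert x.city (counts.getD x.city 0 + 1)) from rfl]
      rcases List.mem_cons.mp hr with rfl | hrt
      · have hnone : ∀ p ∈ t, p.id ≠ r.id := by
          intro p hp h
          exact hxid (h ▸ List.mem_map_of_mem hp)
        rw [pvSweep_untouched t _ _ r.id hnone,
            List.getElem?_set_self hlt]
        have hqr : (r.city == r.city) = true := by simp
        rw [List.filter_cons, if_pos hqr, List.idxOf_cons_self]
      · have hrx : x ≠ r := by
          intro h
          exact hxid (h ▸ List.mem_map_of_mem hrt)
        have hih := ih (res.set x.id (x.city ++ pvPadB (counts.getD x.city 0 + 1) ++ "." ++ x.ty))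
          (counts.insert x.city (counts.getD x.city 0 + 1)) r hnd' hrt
          (by rw [List.length_set]; exact hlt)
        rw [hih]
        by_cases hc : (x.city == r.city) = true
        · have hc' : x.city = r.city := by simpa using hc
          rw [List.filter_cons, if_pos hc, List.idxOf_cons_ne _ hrx, hc']
          rw [PySem.Dict.getD_insert_self, Nat.succ_eq_add_one]
          rw [show counts.getD r.city 0 + 1
                + (List.idxOf r (List.filter (fun p => p.city == r.city) t) + 1)
              = counts.getD r.city 0
                + (List.idxOf r (List.filter (fun p => p.city == r.city) t) + 1 + 1) from by omega]
        · have hcf : (x.city == r.city) = false := by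
            cases h : (x.city == r.city) with
            | false => rfl
            | true => exact absurd h hc
          have hc' : ¬ r.city = x.city := by
            intro h; rw [h] at hcf; simp at hcf
          have hcne : ¬ r.city = x.city := by
            intro h
            rw [h] at hc
            simp at hc
          rw [List.filter_cons, if_neg hc]
          rw [PySem.Dict.getD_insert_of_ne _ _ _ hcne]

-- ---- A's in-place per-group sort loop over the dict's keys ----

theorem pvSortLoop_getD (ks : List String) :
    ∀ (d : PySem.Dict String (List pvRec)), ks.Nodup → ∀ c : String,
    (ks.foldl (fun d c => d.modify c [] (fun g => PySem.List.sorted g (fun p => p.date))) d).getD c []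
      = if c ∈ ks then PySem.List.sorted (d.getD c []) (fun p => p.date) else d.getD c [] := by
  induction ks with
  | nil => intro d _ c; simp
  | cons k t ih =>
      intro d hnd c
      rw [List.nodup_cons] at hnd
      obtain ⟨hk, ht⟩ := hnd
      rw [List.foldl_cons, ih _ ht c, PySem.Dict.getD_modify]
      by_cases hck : c = k
      · subst hck
        rw [if_neg hk, if_pos rfl, if_pos List.mem_cons_self]
      · rw [if_neg hck]
        by_cases hct : c ∈ t
        · rw [if_pos hct, if_pos (List.mem_cons_of_mem k hct)]
        · rw [if_neg hct, if_neg (by simp [hck, hct])]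

theorem pvSortLoop_keys (ks : List String) :
    ∀ (d : PySem.Dict String (List pvRec)), (∀ c ∈ ks, c ∈ d.keys) →
    (ks.foldl (fun d c => d.modify c [] (fun g => PySem.List.sorted g (fun p => p.date))) d).keys
      = d.keys := by
  induction ks with
  | nil => intro d _; rfl
  | cons k t ih =>
      intro d hmem
      rw [List.foldl_cons]
      have hcont : d.contains k = true :=
        (PySem.Dict.contains_iff_mem_keys d k).mpr (hmem k List.mem_cons_self)
      have hkeys : (d.modify k [] (fun g => PySem.List.sorted g (fun p => p.date))).keys = d.keys := by
        rw [PySem.Dict.keys_modify, PySem.Dict.keys_insert_of_contains _ _ hcont]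
      rw [ih _ (by rw [hkeys]; exact fun c hc => hmem c (List.mem_cons_of_mem k hc)), hkeys]

-- ---- the parsed record list shared by both characterizations ----

def pvRecs (rows : List (String × String × String × String)) : List pvRec :=
  (PySem.List.enumerate rows).map (fun q => ⟨q.1.toNat, q.2.1, q.2.2.1, q.2.2.2.1, q.2.2.2.2⟩)

theorem pvRecs_map_id (rows : List (String × String × String × String)) :
    (pvRecs rows).map (·.id) = List.range rows.length := by
  unfold pvRecs
  rw [List.map_map]
  exact pvEnum_map_fst_toNat rows

theorem pvRecs_length (rows : List (String × String × String × String)) :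
    (pvRecs rows).length = rows.length := by
  unfold pvRecs
  rw [List.length_map, pvEnum_length]

theorem pvRecs_nodup (rows : List (String × String × String × String)) :
    ((pvRecs rows).map (·.id)).Nodup := by
  rw [pvRecs_map_id]
  exact List.nodup_range

theorem pvRecs_getElem_id (rows : List (String × String × String × String)) (i : Nat)
    (h : i < (pvRecs rows).length) : (pvRecs rows)[i].id = i := by
  have h2 : i < rows.length := by rw [← pvRecs_length rows]; exact h
  have h3 := congrArg (fun l => l[i]?) (pvRecs_map_id rows)
  simp only [List.getElem?_map, List.getElem?_eq_getElem h, List.getElem?_range h2,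
    Option.map_some] at h3
  exact Option.some.inj h3

theorem pvPad_eq : pvPadB = pvPadA := rfl

-- ---- A's dicts, named for the proofs ----

def pvMkAFold (rows : List (String × String × String × String)) : PySem.Dict Int pvRec :=
  (PySem.List.enumerate rows).foldl (fun d q => d.insert q.1 (pvMkA q)) PySem.Dict.empty

def pvCitiesD (recs : List pvRec) : PySem.Dict String (List pvRec) :=
  recs.foldl (fun d p => d.modify p.city [] (fun g => g ++ [p])) PySem.Dict.empty

def pvCities2D (recs : List pvRec) : PySem.Dict String (List pvRec) :=
  (pvCitiesD recs).keys.foldl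
    (fun d c => d.modify c [] (fun g => PySem.List.sorted g (fun p => p.date))) (pvCitiesD recs)

def pvNND (recs : List pvRec) : PySem.Dict Nat String :=
  (pvCities2D recs).keys.foldl
    (fun nn c =>
      (PySem.List.enumerate ((pvCities2D recs).getD c [])).foldl
        (fun nn q => nn.insert q.2.id (c ++ pvPadA (q.1.toNat + 1) ++ "." ++ q.2.ty)) nn)
    PySem.Dict.empty

theorem pvPhotos_values (rows : List (String × String × String × String)) :
    (pvMkAFold rows).values = pvRecs rows := by
  have hitems := PySem.Dict.items_foldl_insert_fresh (PySem.List.enumerate rows) Prod.fst pvMkA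
    PySem.Dict.empty (fun a _ => PySem.Dict.contains_empty _) (pvEnum_fst_nodup rows 0)
  unfold pvMkAFold
  simp only [PySem.Dict.values]
  rw [hitems]
  simp [List.map_map]
  rfl

theorem pvCities_getD (recs : List pvRec) (c : String) :
    (pvCitiesD recs).getD c [] = recs.filter (fun p => p.city == c) := by
  unfold pvCitiesD
  rw [← List.foldl_map (f := fun p : pvRec => (p.city, p))
        (g := fun (d : PySem.Dict String (List pvRec)) (q : String × pvRec) =>
          d.modify q.1 [] (fun g => g ++ [q.2])),
      PySem.Dict.getD_foldl_modify_append, List.filter_map]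
  simp [List.map_map, Function.comp_def]

theorem pvCities_keys_nodup (recs : List pvRec) : (pvCitiesD recs).keys.Nodup :=
  PySem.Dict.nodup_keys_foldl_modify_key recs (fun p => p.city) [] (fun _ p => (fun g => g ++ [p]))
    PySem.Dict.empty PySem.Dict.nodup_keys_empty

theorem pvCities_mem_keys (recs : List pvRec) : ∀ r ∈ recs, r.city ∈ (pvCitiesD recs).keys := by
  intro r hr
  have hk : (pvCitiesD recs).keys
      = PySem.Set.update (PySem.Dict.empty : PySem.Dict String (List pvRec)).keys
          (recs.map (fun p => p.city)) :=
    PySem.Dict.keys_foldl_modify_key recs (fun p => p.city) [] (fun _ p => (fun g => g ++ [p]))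
      PySem.Dict.empty
  rw [hk]
  exact (PySem.Set.mem_update _ _ _).mpr (Or.inr (List.mem_map_of_mem hr))

theorem pvCities2_getD (recs : List pvRec) :
    ∀ c ∈ (pvCitiesD recs).keys, (pvCities2D recs).getD c [] = pvGrp recs c := by
  intro c hc
  unfold pvCities2D
  rw [pvSortLoop_getD _ _ (pvCities_keys_nodup recs) c, if_pos hc, pvCities_getD]
  rfl

theorem pvCities2_keys (recs : List pvRec) : (pvCities2D recs).keys = (pvCitiesD recs).keys :=
  pvSortLoop_keys _ _ (fun _ hc => hc)

theorem pvEnum_map_snd_id (l : List pvRec) :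
    (PySem.List.enumerate l).map (fun q => q.2.id) = l.map (·.id) := by
  calc (PySem.List.enumerate l).map (fun q => q.2.id)
      = ((PySem.List.enumerate l).map Prod.snd).map (·.id) := by rw [List.map_map]; rfl
    _ = l.map (·.id) := by rw [pvEnum_map_snd]

theorem pvNND_getD (recs : List pvRec) (hnodup : (recs.map (·.id)).Nodup) :
    ∀ r ∈ recs, (pvNND recs).getD r.id "" = pvSpecName recs r := by
  have hks : (pvCities2D recs).keys = (pvCitiesD recs).keys := pvCities2_keys recs
  have hksnd : (pvCitiesD recs).keys.Nodup := pvCities_keys_nodup recs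
  have h1 : pvNND recs
      = (pvCitiesD recs).keys.foldl
          (fun nn c =>
            ((PySem.List.enumerate (pvGrp recs c)).map (fun q => (c, q))).foldl
              (fun nn w =>
                nn.insert w.2.2.id (w.1 ++ pvPadA (w.2.1.toNat + 1) ++ "." ++ w.2.2.ty)) nn)
          PySem.Dict.empty := by
    unfold pvNND
    rw [hks]
    apply PySem.List.foldl_congr_mem
    intro nn c hc
    rw [pvCities2_getD recs c hc, List.foldl_map]
  have h2 : pvNND recs
      = (((pvCitiesD recs).keys.flatMap
            (fun c => (PySem.List.enumerate (pvGrp recs c)).map (fun q => (c, q)))).foldl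
          (fun nn w => nn.insert w.2.2.id (w.1 ++ pvPadA (w.2.1.toNat + 1) ++ "." ++ w.2.2.ty))
          PySem.Dict.empty) := by
    rw [h1, pvFoldl_flatMap]
  have hPids : (((pvCitiesD recs).keys.flatMap
        (fun c => (PySem.List.enumerate (pvGrp recs c)).map (fun q => (c, q)))).map
          (fun w => w.2.2.id))
      = (pvCitiesD recs).keys.flatMap (fun c => (pvGrp recs c).map (·.id)) := by
    rw [List.map_flatMap]
    apply List.flatMap_congr
    intro c _
    rw [List.map_map]
    exact pvEnum_map_snd_id _
  have hPnd : (((pvCitiesD recs).keys.flatMap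
        (fun c => (PySem.List.enumerate (pvGrp recs c)).map (fun q => (c, q)))).map
          (fun w => w.2.2.id)).Nodup := by
    rw [hPids, List.nodup_flatMap]
    refine ⟨?_, ?_⟩
    · intro c _
      have hperm := (PySem.List.sorted_perm (recs.filter (fun p => p.city == c))
        (fun p => p.date) false).map (·.id)
      have hsub : ((recs.filter (fun p => p.city == c)).map (·.id)).Nodup :=
        (List.filter_sublist.map _).nodup hnodup
      exact (hperm.nodup_iff).mpr hsub
    · have hpw : (pvCitiesD recs).keys.Pairwise (· ≠ ·) := hksnd
      refine hpw.imp ?_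
      intro c c' hne
      intro i hic hic'
      rcases List.mem_map.mp hic with ⟨a, ha, haid⟩
      rcases List.mem_map.mp hic' with ⟨b, hb, hbid⟩
      have ha' := (PySem.List.mem_sorted _ _ _ a).mp ha
      have hb' := (PySem.List.mem_sorted _ _ _ b).mp hb
      rcases List.mem_filter.mp ha' with ⟨har, hac⟩
      rcases List.mem_filter.mp hb' with ⟨hbr, hbc⟩
      have hab : a = b := List.inj_on_of_nodup_map hnodup har hbr (by rw [haid, hbid])
      apply hne
      have hac' : a.city = c := by simpa using hac
      have hbc' : b.city = c' := by simpa using hbc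
      rw [← hac', hab, hbc']
  have hitems := PySem.Dict.items_foldl_insert_fresh
      ((pvCitiesD recs).keys.flatMap
        (fun c => (PySem.List.enumerate (pvGrp recs c)).map (fun q => (c, q))))
      (fun w => w.2.2.id)
      (fun w => w.1 ++ pvPadA (w.2.1.toNat + 1) ++ "." ++ w.2.2.ty) PySem.Dict.empty
      (fun a _ => PySem.Dict.contains_empty _) hPnd
  beta_reduce at hitems
  rw [show (PySem.Dict.empty : PySem.Dict Nat String).items = [] from rfl,
      List.nil_append] at hitems
  have hkeysnd : (pvNND recs).keys.Nodup := by
    show ((pvNND recs).items.map (fun x => x.1)).Nodup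
    rw [h2, hitems]
    rw [List.map_map]
    exact hPnd
  intro r hr
  have hrg : r ∈ pvGrp recs r.city := by
    unfold pvGrp
    rw [PySem.List.mem_sorted]
    exact List.mem_filter.mpr ⟨hr, by simp⟩
  have hilt := List.idxOf_lt_length_of_mem hrg
  have hget : (pvGrp recs r.city)[List.idxOf r (pvGrp recs r.city)]? = some r := by
    rw [List.getElem?_eq_getElem hilt, List.getElem_idxOf hilt]
  have hmemE := pvEnum_mem _ _ _ hget 0
  have hw : (r.city, ((0 : Int) + (List.idxOf r (pvGrp recs r.city) : Int), r))
      ∈ (pvCitiesD recs).keys.flatMap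
          (fun c => (PySem.List.enumerate (pvGrp recs c)).map (fun q => (c, q))) :=
    List.mem_flatMap.mpr ⟨r.city, pvCities_mem_keys recs r hr, List.mem_map_of_mem hmemE⟩
  have himg : ((fun w : String × (Int × pvRec) => (w.2.2.id,
        w.1 ++ pvPadA (w.2.1.toNat + 1) ++ "." ++ w.2.2.ty))
        (r.city, ((0 : Int) + (List.idxOf r (pvGrp recs r.city) : Int), r)))
      = (r.id, pvSpecName recs r) := by
    unfold pvSpecName
    have ht : ((0 : Int) + (List.idxOf r (pvGrp recs r.city) : Int)).toNat
        = List.idxOf r (pvGrp recs r.city) := by omega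
    simp only []
    rw [ht]
  have hpair : (r.id, pvSpecName recs r) ∈ (pvNND recs).items := by
    rw [h2, hitems, ← himg]
    exact List.mem_map_of_mem hw
  exact PySem.Dict.getD_of_get?_eq_some _ ""
    (PySem.Dict.get?_of_mem_items _ hpair hkeysnd)

theorem pvB_list (rows : List (String × String × String × String)) :
    ((PySem.List.sorted2 (pvRecs rows) (fun r => r.city) (fun r => r.date)).foldl pvStepB
      (List.replicate (pvRecs rows).length "", PySem.Dict.empty)).1
    = (pvRecs rows).map (fun r => pvSpecName (pvRecs rows) r) := by
  apply List.ext_getElem?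
  intro i
  by_cases hi : i < (pvRecs rows).length
  · have hr : (pvRecs rows)[i] ∈ pvRecs rows := List.getElem_mem hi
    have hid : (pvRecs rows)[i].id = i := pvRecs_getElem_id rows i hi
    have hsrtperm :=
      PySem.List.sorted2_perm (pvRecs rows) (fun r => r.city) (fun r => r.date) false
    have hmem : (pvRecs rows)[i]
        ∈ PySem.List.sorted2 (pvRecs rows) (fun r => r.city) (fun r => r.date) :=
      hsrtperm.mem_iff.mpr hr
    have hnd : ((PySem.List.sorted2 (pvRecs rows) (fun r => r.city)
        (fun r => r.date)).map (·.id)).Nodup :=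
      ((hsrtperm.map (·.id)).nodup_iff).mpr (pvRecs_nodup rows)
    have hlt : (pvRecs rows)[i].id < (List.replicate (pvRecs rows).length "").length := by
      rw [List.length_replicate, hid]
      exact hi
    have hsw := pvSweep_get _ _ PySem.Dict.empty _ hnd hmem hlt
    rw [hid] at hsw
    rw [hsw, List.getElem?_map, List.getElem?_eq_getElem hi]
    simp only [PySem.Dict.getD_empty, Nat.zero_add, pvPad_eq, pvFilter_sorted2]
    rfl
  · have hlenB : ((PySem.List.sorted2 (pvRecs rows) (fun r => r.city)
        (fun r => r.date)).foldl pvStepB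
        (List.replicate (pvRecs rows).length "", PySem.Dict.empty)).1.length
        = (pvRecs rows).length := by
      rw [pvSweep_length, List.length_replicate]
    rw [List.getElem?_eq_none_iff.mpr (by rw [hlenB]; omega),
        List.getElem?_eq_none_iff.mpr (by rw [List.length_map]; omega)]

theorem pvA_eq (rows : List (String × String × String × String)) :
    pvBodyA rows
      = (pvRecs rows).foldl
          (fun acc p => acc ++ (pvNND (pvRecs rows)).getD p.id "" ++ "\n") "" := by
  show ((pvMkAFold rows).values.foldl
      (fun acc p => acc ++ (pvNND ((pvMkAFold rows).values)).getD p.id "" ++ "\n") "")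
    = (pvRecs rows).foldl
        (fun acc p => acc ++ (pvNND (pvRecs rows)).getD p.id "" ++ "\n") ""
  rw [pvPhotos_values]

theorem pvBody_eq (rows : List (String × String × String × String)) :
    pvBodyA rows = pvBodyB rows := by
  rw [pvA_eq]
  rw [PySem.List.foldl_congr_mem (pvRecs rows) _
        (fun acc p => acc ++ pvSpecName (pvRecs rows) p ++ "\n") ""
        (fun acc p hp => by rw [pvNND_getD (pvRecs rows) (pvRecs_nodup rows) p hp])]
  show _ = ((PySem.List.sorted2 (pvRecs rows) (fun r => r.city) (fun r => r.date)).foldl pvStepB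
      (List.replicate (pvRecs rows).length "", PySem.Dict.empty)).1.foldl
      (fun acc s => acc ++ s ++ "\n") ""
  rw [pvB_list rows, List.foldl_map]

-- ---- under Pre_solution the parsing loop cannot fail ----

theorem pvParseA_isSome (line : String)
    (h : 4 ≤ ((PySem.Str.split? line ",").getD []).length) : (pvParseA line).isSome := by
  unfold pvParseA
  have hg : ∀ n : Nat, n < 4 →
      ∃ v, PySem.List.pyGet? ((PySem.Str.split? line ",").getD []) (n : Int) = some v := by
    intro n hn
    rw [PySem.List.pyGet?_natCast]
    exact ⟨_, List.getElem?_eq_getElem (by omega)⟩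
  obtain ⟨v0, h0⟩ := hg 0 (by omega)
  obtain ⟨v1, h1⟩ := hg 1 (by omega)
  obtain ⟨v2, h2⟩ := hg 2 (by omega)
  obtain ⟨v3, h3⟩ := hg 3 (by omega)
  push_cast at h0 h1 h2 h3
  simp only [h0, h1, h2, h3]
  rfl

theorem pvMapM_isSome {α β : Type} (f : α → Option β) :
    ∀ l : List α, (∀ x ∈ l, (f x).isSome) → (l.mapM f).isSome := by
  intro l
  induction l with
  | nil => intro _; rfl
  | cons x t ih =>
      intro h
      rw [List.mapM_cons]
      obtain ⟨v, hv⟩ := Option.isSome_iff_exists.mp (h x List.mem_cons_self)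
      obtain ⟨w, hw⟩ := Option.isSome_iff_exists.mp (ih (fun y hy => h y (List.mem_cons_of_mem x hy)))
      rw [hv, hw]
      rfl

-- ===== VERDICT =====
theorem solution_spec : Claim_equal_solution := by
  intro S _hdom hpre
  show solution S = solution_alt S
  unfold solution solution_alt
  dsimp only
  rw [show pvParseB = pvParseA from rfl]
  cases h : ((PySem.Str.split? (PySem.Str.strip (PySem.Str.replace S "." ",")) "\n").getD
      []).mapM pvParseA with
  | none =>
      -- Pre_solution rules this branch out: every line parses
      exact absurd (pvMapM_isSome pvParseA _ (fun line hl => pvParseA_isSome line (hpre line hl)))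
        (by rw [h]; simp)
  | some rows => exact pvBody_eq rows
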